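-- pv_equiv track=rewrite | github.com/kejrak/advent-of-code-2023 | 13-Point-Of-Incidence/python/main.py | incidence
-- ===== SOURCE A (Python) =====
-- def incidence(pattern: list[str]) -> int:
--     for i in range(1, len(pattern)):
--         above = pattern[:i][::-1]
--         below = pattern[i:]
--
--         above = above[: len(below)]
--         below = below[: len(above)]
--
--         # - For part two, you shoudl use - #
--         # if get_smudge(above, below):
--         #     return i
--
--         if above == below:
--             return i
--     return 0
-- ===== SOURCE B (Python) =====
-- def incidence(pattern: list[str]) -> int:
--     # Single pass maintaining the reversed prefix incrementally; zip's
--     # truncation replaces A's four slice operations per candidate line.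
--     above = []
--     below = list(pattern)
--     i = 0
--     while below:
--         if above and all(x == y for x, y in zip(above, below)):
--             return i
--         above.insert(0, below.pop(0))
--         i += 1
--     return 0
-- ===== Notes on version B (the rewrite author's own statement) =====
-- stated objective: alternative
-- what changed: B replaces A's per-candidate slicing (four slices rebuilt at every boundary) with a single pass that maintains the reversed prefix incrementally and tests the mirror with an early-exiting truncating zip comparison.
import Mathlib
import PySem

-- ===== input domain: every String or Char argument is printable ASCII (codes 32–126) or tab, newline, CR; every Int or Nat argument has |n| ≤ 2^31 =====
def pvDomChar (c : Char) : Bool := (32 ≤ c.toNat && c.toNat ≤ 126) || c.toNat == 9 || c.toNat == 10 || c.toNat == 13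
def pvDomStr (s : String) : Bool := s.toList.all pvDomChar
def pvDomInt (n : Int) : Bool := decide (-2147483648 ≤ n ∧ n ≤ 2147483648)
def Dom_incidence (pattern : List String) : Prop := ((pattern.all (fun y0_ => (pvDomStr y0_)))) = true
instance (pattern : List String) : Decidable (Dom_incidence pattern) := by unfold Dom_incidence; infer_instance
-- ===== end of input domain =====

-- B maintains the reversed prefix incrementally and compares with a truncating zip,
-- instead of A's four fresh slices per candidate line (objective: alternative).

-- ===== PORT A =====
-- for i in range(1, len(pattern)) with early return, as recursion over the index list
def incALoop (pattern : List String) : List Int → Int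
  | [] => 0
  | i :: rest =>
    -- above = pattern[:i][::-1]  (s[::-1] is reverse: PySem.List.slice?_none_none_neg_one)
    let above := (PySem.List.slice pattern none (some i)).reverse
    -- below = pattern[i:]
    let below := PySem.List.slice pattern (some i) none
    -- above = above[:len(below)]
    let above2 := PySem.List.slice above none (some (PySem.List.len below))
    -- below = below[:len(above)]
    let below2 := PySem.List.slice below none (some (PySem.List.len above2))
    if above2 == below2 then i else incALoop pattern rest

def incidence (pattern : List String) : Int :=
  incALoop pattern (PySem.List.pyRange 1 (PySem.List.len pattern) 1)

-- ===== PORT B =====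
-- while below: if above and all(x == y for x, y in zip(above, below)): return i
--              above.insert(0, below.pop(0)); i += 1
def incBLoop (above : List String) (below : List String) (i : Int) : Int :=
  match below with
  | [] => 0
  | b :: bs =>
    if !above.isEmpty && (above.zip (b :: bs)).all (fun p => p.1 == p.2) then i
    else incBLoop (b :: above) bs (i + 1)

def incidence_alt (pattern : List String) : Int :=
  incBLoop [] pattern 0

-- ===== PRECONDITION & SPEC =====
def Spec_incidence (pattern : List String) (out : Int) : Prop := out = incidence_alt pattern
instance (pattern : List String) (out : Int) : Decidable (Spec_incidence pattern out) := by unfold Spec_incidence; infer_instance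

-- ===== CLAIM (what is proved, stated in full; the proofs are below) =====
def Claim_equal_incidence : Prop := ∀ (pattern : List String), Dom_incidence pattern → Spec_incidence pattern (incidence pattern)

-- ===== LEMMAS AND PROOFS =====

-- A's doubly-truncated slice equality is B's truncating zip comparison.
theorem take_eq_iff_zip_all (a b : List String) :
    (a.take b.length == b.take (a.take b.length).length) =
      (a.zip b).all (fun p => p.1 == p.2) := by
  induction a generalizing b with
  | nil => simp
  | cons x xs ih =>
    cases b with
    | nil => simp
    | cons y ys =>
      simp only [List.length_cons, List.take_succ_cons, List.zip_cons_cons, List.all_cons,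
        List.cons_beq_cons]
      rw [ih ys]

theorem incALoop_eq_incBLoop (bel : List String) :
    ∀ (abv pattern : List String) (j : Nat),
      pattern = abv.reverse ++ bel → abv.length = j → 1 ≤ j →
      incALoop pattern (PySem.List.pyRange (j : Int) (pattern.length : Int) 1) =
        incBLoop abv bel (j : Int) := by
  induction bel with
  | nil =>
    intro abv pattern j hp hl hj
    have hlen : (pattern.length : Int) = (j : Int) := by
      subst hp; simp [hl.symm]
    rw [hlen, PySem.List.pyRange_one_eq_nil (le_refl _)]
    rfl
  | cons b bs ih =>
    intro abv pattern j hp hl hj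
    have hlt : (j : Int) < (pattern.length : Int) := by
      subst hp; simp; omega
    rw [PySem.List.pyRange_one_cons hlt]
    have htake : pattern.take j = abv.reverse := by
      subst hp
      rw [List.take_append_of_le_length (by simp [hl])]
      simp [hl]
    have hdrop : pattern.drop j = b :: bs := by
      subst hp
      rw [List.drop_append_of_le_length (by simp [hl])]
      simp [hl]
    -- unfold one step of A's loop and rewrite the slices
    show (let above := (PySem.List.slice pattern none (some (j : Int))).reverse
          let below := PySem.List.slice pattern (some (j : Int)) none
          let above2 := PySem.List.slice above none (some (PySem.List.len below))
          let below2 := PySem.List.slice below none (some (PySem.List.len above2))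
          if above2 == below2 then (j : Int)
          else incALoop pattern (PySem.List.pyRange ((j : Int) + 1) (pattern.length : Int) 1)) = _
    rw [PySem.List.slice_to_natCast, PySem.List.slice_from_natCast, htake, hdrop,
      List.reverse_reverse]
    simp only [PySem.List.len_eq, PySem.List.slice_to_natCast]
    rw [take_eq_iff_zip_all abv (b :: bs)]
    have habv : abv.isEmpty = false := by
      cases abv with
      | nil => simp at hl; omega
      | cons _ _ => rfl
    have hrec : incALoop pattern (PySem.List.pyRange ((j : Int) + 1) (pattern.length : Int) 1) =
        incBLoop (b :: abv) bs ((j : Int) + 1) := by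
      have : ((j : Int) + 1) = ((j + 1 : Nat) : Int) := by push_cast; ring
      rw [this]
      exact ih (b :: abv) pattern (j + 1)
        (by subst hp; simp) (by simp [hl]) (by omega)
    rw [incBLoop, habv]
    simp only [Bool.not_false, Bool.true_and]
    by_cases h : ((abv.zip (b :: bs)).all fun p => p.1 == p.2) = true
    · simp [h]
    · simp only [h, if_false, Bool.false_eq_true]
      exact hrec

-- ===== VERDICT (by name: the statement is the Claim_ definition above) =====
theorem incidence_spec : Claim_equal_incidence := by
  intro pattern _
  unfold Spec_incidence incidence incidence_alt
  cases pattern with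
  | nil => rfl
  | cons p ps =>
    rw [show incBLoop [] (p :: ps) 0 = incBLoop [p] ps 1 from rfl]
    have h := incALoop_eq_incBLoop ps [p] (p :: ps) 1 (by simp) rfl (le_refl 1)
    simpa [PySem.List.len_eq] using h
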